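-- pv_equiv track=rewrite | github.com/VuBui217/dailycodingchallenge | october/spooky_case.py | spookify
-- ===== SOURCE A (Python) =====
-- def spookify(boo):
--     lst = list(boo.lower())
--     ch_count = 0
--     for i in range(len(lst)):
--         if lst[i].isalpha():
--             ch_count +=1
--             if ch_count % 2 == 1:
--                 lst[i] = lst[i].upper()
--         elif lst[i] == '_' or lst[i] == '-':
--             lst[i] = '~'
--
--
--     return ''.join(lst)
-- ===== SOURCE B (Python) =====
-- def spookify(boo):
--     # extract-transform-merge: normalize, pull out the letters, uppercase every
--     # other one by its letter rank, then weave them back into the skeleton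
--     t = ['~' if c in '_-' else c for c in boo.lower()]
--     letters = [c for c in t if c.isalpha()]
--     fixed = [c.upper() if i % 2 == 0 else c for i, c in enumerate(letters)]
--     it = iter(fixed)
--     return ''.join(next(it) if c.isalpha() else c for c in t)
-- ===== Notes on version B (the rewrite author's own statement) =====
-- stated objective: alternative
-- what changed: A's single stateful index loop (letter counter threaded through mixed content, in-place list mutation) is replaced by an extract-transform-merge pipeline: translate the lowered string, filter out just the letters, uppercase them by their index parity in the letters list alone, then weave the fixed letters back into the non-letter skeleton with an iterator.
import Mathlib
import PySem

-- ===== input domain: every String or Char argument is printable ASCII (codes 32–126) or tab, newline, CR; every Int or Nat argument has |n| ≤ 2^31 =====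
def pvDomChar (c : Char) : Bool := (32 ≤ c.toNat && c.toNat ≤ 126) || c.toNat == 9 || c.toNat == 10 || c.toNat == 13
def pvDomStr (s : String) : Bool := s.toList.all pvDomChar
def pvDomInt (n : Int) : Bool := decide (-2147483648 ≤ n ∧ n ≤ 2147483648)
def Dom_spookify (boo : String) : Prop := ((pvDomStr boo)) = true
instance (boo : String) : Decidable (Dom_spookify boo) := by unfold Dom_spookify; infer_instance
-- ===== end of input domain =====

-- B replaces A's single stateful index loop with an extract-transform-merge pipeline
-- (translate, filter the letters, uppercase by letter rank, weave back); objective: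
-- alternative decomposition, same cost.

-- ===== PORT A =====
-- one loop iteration of A: reads lst[i], may write lst[i] back, threads the letter counter
def spookAStep (st : List Char × Nat) (i : Nat) : List Char × Nat :=
  let c := st.1.getD i ' '
  if PySem.Chars.isalpha c then
    let n := st.2 + 1
    if n % 2 == 1 then (st.1.set i (PySem.Chars.upperChar c), n) else (st.1, n)
  else if c == '_' || c == '-' then (st.1.set i '~', st.2)
  else st

def spookify (boo : String) : String :=
  let lst := (PySem.Str.lower boo).toList
  let res := (List.range lst.length).foldl spookAStep (lst, 0)
  String.ofList res.1

-- ===== PORT B =====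
-- "'~' if c in '_-' else c", applied charwise
def spookTr (c : Char) : Char := if c == '_' || c == '-' then '~' else c

-- the comprehension "[c.upper() if i % 2 == 0 else c for i, c in enumerate(letters)]"
def spookIdxUp : Nat → List Char → List Char
  | _, [] => []
  | i, c :: rest => (if i % 2 == 0 then PySem.Chars.upperChar c else c) :: spookIdxUp (i + 1) rest

-- the merging generator "next(it) if c.isalpha() else c for c in t" (it never exhausts)
def spookMerge : List Char → List Char → List Char
  | [], _ => []
  | c :: rest, ls =>
    if PySem.Chars.isalpha c then
      match ls with
      | [] => []            -- unreachable: fixed has exactly as many letters as t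
      | l :: ls' => l :: spookMerge rest ls'
    else c :: spookMerge rest ls

def spookify_alt (boo : String) : String :=
  let t := ((PySem.Str.lower boo).toList).map spookTr
  let letters := t.filter (fun c => PySem.Chars.isalpha c)
  let fixed := spookIdxUp 0 letters
  String.ofList (spookMerge t fixed)

-- ===== PRECONDITION & SPEC =====
def Spec_spookify (boo : String) (out : String) : Prop := out = spookify_alt boo
instance (boo : String) (out : String) : Decidable (Spec_spookify boo out) := by unfold Spec_spookify; infer_instance

-- ===== CLAIM (what is proved, stated in full; the proofs are below) =====
def Claim_equal_spookify : Prop := ∀ (boo : String), Dom_spookify boo → Spec_spookify boo (spookify boo)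

-- ===== LEMMAS AND PROOFS =====

-- direct recursion characterizing A's index loop
def spookRec : List Char → Nat → List Char
  | [], _ => []
  | c :: rest, k =>
    if PySem.Chars.isalpha c then
      (if (k + 1) % 2 == 1 then PySem.Chars.upperChar c else c) :: spookRec rest (k + 1)
    else
      (if c == '_' || c == '-' then '~' else c) :: spookRec rest k

theorem getD_append_len (pre rest : List Char) (c d : Char) :
    (pre ++ c :: rest).getD pre.length d = c := by
  induction pre with
  | nil => rfl
  | cons x xs ih => simp [ih]

theorem set_append_len (pre rest : List Char) (c x : Char) :
    (pre ++ c :: rest).set pre.length x = pre ++ x :: rest := by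
  induction pre with
  | nil => rfl
  | cons y ys ih => simp [ih]

theorem spookA_loop (cs : List Char) : ∀ (pre : List Char) (k : Nat),
    (List.range' pre.length cs.length 1).foldl spookAStep (pre ++ cs, k)
      = (pre ++ spookRec cs k, k + cs.countP (fun c => PySem.Chars.isalpha c)) := by
  induction cs with
  | nil => intro pre k; simp [spookRec]
  | cons c rest ih =>
    intro pre k
    rw [List.length_cons, List.range'_succ, List.foldl_cons]
    by_cases hα : PySem.Chars.isalpha c
    · by_cases hodd : (k + 1) % 2 == 1
      · have hstep : spookAStep (pre ++ c :: rest, k) pre.length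
            = (pre ++ PySem.Chars.upperChar c :: rest, k + 1) := by
          simp [spookAStep, getD_append_len, set_append_len, hα, hodd]
        rw [hstep]
        have := ih (pre ++ [PySem.Chars.upperChar c]) (k + 1)
        simp only [List.length_append, List.length_cons, List.length_nil,
          List.append_assoc, List.cons_append, List.nil_append] at this
        rw [this]
        simp [spookRec, hα, hodd, List.countP_cons]
        omega
      · have hstep : spookAStep (pre ++ c :: rest, k) pre.length
            = (pre ++ c :: rest, k + 1) := by
          simp [spookAStep, getD_append_len, hα, hodd]
        rw [hstep]
        have := ih (pre ++ [c]) (k + 1)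
        simp only [List.length_append, List.length_cons, List.length_nil,
          List.append_assoc, List.cons_append, List.nil_append] at this
        rw [this]
        simp [spookRec, hα, hodd, List.countP_cons]
        omega
    · by_cases htr : (c == '_' || c == '-') = true
      · have hstep : spookAStep (pre ++ c :: rest, k) pre.length
            = (pre ++ '~' :: rest, k) := by
          simp [spookAStep, getD_append_len, set_append_len, hα, htr]
        rw [hstep]
        have := ih (pre ++ ['~']) k
        simp only [List.length_append, List.length_cons, List.length_nil,
          List.append_assoc, List.cons_append, List.nil_append] at this
        rw [this]
        simp [spookRec, hα, htr, List.countP_cons]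
      · have hstep : spookAStep (pre ++ c :: rest, k) pre.length
            = (pre ++ c :: rest, k) := by
          simp [spookAStep, getD_append_len, hα, htr]
        rw [hstep]
        have := ih (pre ++ [c]) k
        simp only [List.length_append, List.length_cons, List.length_nil,
          List.append_assoc, List.cons_append, List.nil_append] at this
        rw [this]
        simp [spookRec, hα, htr, List.countP_cons]

theorem isalpha_underscore : PySem.Chars.isalpha '_' = false := by decide
theorem isalpha_dash : PySem.Chars.isalpha '-' = false := by decide
theorem isalpha_tilde : PySem.Chars.isalpha '~' = false := by decide

-- B's extract-transform-merge pipeline computes the same string as A's loop recursion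
theorem spookB_pipeline (cs : List Char) : ∀ (k : Nat),
    spookMerge (cs.map spookTr)
        (spookIdxUp k ((cs.map spookTr).filter (fun c => PySem.Chars.isalpha c)))
      = spookRec cs k := by
  induction cs with
  | nil => intro k; rfl
  | cons c rest ih =>
    intro k
    by_cases htr : (c == '_' || c == '-') = true
    · have hc : c = '_' ∨ c = '-' := by
        rcases Bool.or_eq_true_iff.mp htr with h | h
        · exact Or.inl (beq_iff_eq.mp h)
        · exact Or.inr (beq_iff_eq.mp h)
      have hα : PySem.Chars.isalpha c = false := by
        rcases hc with rfl | rfl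
        · exact isalpha_underscore
        · exact isalpha_dash
      simp [spookTr, spookMerge, spookRec, htr, hα, isalpha_tilde, ih]
    · have htr' : spookTr c = c := by simp [spookTr, htr]
      by_cases hα : PySem.Chars.isalpha c
      · have hpar : (k % 2 == 0) = ((k + 1) % 2 == 1) := by
          rcases Nat.mod_two_eq_zero_or_one k with h | h <;> simp [h, Nat.add_mod]
      
        simp only [List.map_cons, htr', List.filter_cons, hα, if_pos, spookIdxUp,
          spookMerge, spookRec, hpar, ih (k + 1)]
      · simp [spookMerge, spookRec, htr', hα, htr, ih k]

-- ===== VERDICT (by name: the statement is the Claim_ definition above) =====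
theorem spookify_spec : Claim_equal_spookify := by
  intro boo _
  unfold Spec_spookify spookify spookify_alt
  have hA := spookA_loop ((PySem.Str.lower boo).toList) [] 0
  simp only [List.length_nil, List.nil_append] at hA
  rw [← List.range_eq_range'] at hA
  simp only [hA, spookB_pipeline ((PySem.Str.lower boo).toList) 0]
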